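-- pv_equiv track=rewrite | github.com/wikimedia/mediawiki-tools-dependency-analysis | bin/tangle-stats.py | analyze_histogram
-- ===== SOURCE A (Python) =====
-- def analyze_histogram( hist, weights = None ):
-- 	num_total = 0
-- 	sum_good = 0
-- 	sum_total = 0
-- 	largest_size = 0
--
-- 	for n in range( 0, len( hist ) ):
-- 		size = hist[n]
-- 		w = weights[n] if weights else size;
--
-- 		num_total += 1
-- 		sum_total += w
--
-- 		if size == 1:
-- 			# if the component size is 1, the component is not a tangle,
-- 			# so count the node as "good".
-- 			sum_good += w
-- 		elif w > largest_size:
-- 			largest_size = w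
--
-- 	return num_total, sum_good, sum_total, largest_size
-- ===== SOURCE B (Python) =====
-- def analyze_histogram(hist, weights=None):
--     ws = list(weights[:len(hist)]) if weights else list(hist)
--     pairs = list(zip(hist, ws))
--     sum_good = sum(w for s, w in pairs if s == 1)
--     largest_size = max([0] + [w for s, w in pairs if s != 1])
--     return len(hist), sum_good, sum(ws), largest_size
-- ===== Notes on version B (the rewrite author's own statement) =====
-- stated objective: simpler
-- what changed: replaces the single index-driven accumulator loop by building the weight list once and doing independent reductions (len, two filtered sums, a seeded max) over zipped (size, weight) pairs
import Mathlib
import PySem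

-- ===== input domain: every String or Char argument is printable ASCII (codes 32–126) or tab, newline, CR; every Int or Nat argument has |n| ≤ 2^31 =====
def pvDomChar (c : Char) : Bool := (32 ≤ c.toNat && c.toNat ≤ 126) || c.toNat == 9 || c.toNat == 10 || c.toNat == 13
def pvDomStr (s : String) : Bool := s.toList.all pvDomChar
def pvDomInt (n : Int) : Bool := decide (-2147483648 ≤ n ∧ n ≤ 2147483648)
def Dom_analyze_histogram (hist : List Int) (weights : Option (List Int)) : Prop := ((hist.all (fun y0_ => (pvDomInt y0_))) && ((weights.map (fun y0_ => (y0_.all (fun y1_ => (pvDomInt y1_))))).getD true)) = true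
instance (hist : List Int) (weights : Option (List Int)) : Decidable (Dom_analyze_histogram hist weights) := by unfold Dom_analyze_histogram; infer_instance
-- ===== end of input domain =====

-- B replaces A's single index-driven accumulator loop by building the weight list once
-- and computing the four results as independent reductions over zipped (size, weight) pairs.

-- ===== PORT A =====
-- Literal transliteration of A: one loop over range(0, len(hist)) carrying the four
-- accumulators. pyGetD … 0 stands for the indexing; Pre_ excludes the inputs where
-- Python's weights[n] would raise IndexError (weights non-empty but shorter than hist).
def analyze_histogram (hist : List Int) (weights : Option (List Int)) : Int × Int × Int × Int :=
  (PySem.List.pyRange 0 hist.length 1).foldl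
    (fun acc n =>
      let size := PySem.List.pyGetD hist n 0
      let w : Int := match weights with
        | some l => if l.isEmpty then size else PySem.List.pyGetD l n 0
        | none => size
      let (nt, sg, st, ls) := acc
      if size == 1 then (nt + 1, sg + w, st + w, ls)
      else if w > ls then (nt + 1, sg, st + w, w)
      else (nt + 1, sg, st + w, ls))
    (0, 0, 0, 0)

-- ===== PORT B =====
def analyze_histogram_alt (hist : List Int) (weights : Option (List Int)) : Int × Int × Int × Int :=
  let ws : List Int := match weights with
    | some l => if l.isEmpty then hist else PySem.List.slice l none (some (hist.length : Int))
    | none => hist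
  let pairs := hist.zip ws
  let sum_good := ((pairs.filter (fun p => p.1 == 1)).map (fun p => p.2)).sum
  let largest_size := (PySem.List.max? ((0 : Int) :: (pairs.filter (fun p => p.1 != 1)).map (fun p => p.2)) (fun y => y)).getD 0
  ((hist.length : Int), sum_good, ws.sum, largest_size)

-- ===== PRECONDITION & SPEC =====
-- Pre_ excludes exactly the inputs where A raises IndexError: a non-empty weights list
-- shorter than hist.
def Pre_analyze_histogram (hist : List Int) (weights : Option (List Int)) : Prop :=
  (weights.all (fun l => l.isEmpty || decide (hist.length ≤ l.length))) = true
instance (hist : List Int) (weights : Option (List Int)) : Decidable (Pre_analyze_histogram hist weights) := by unfold Pre_analyze_histogram; infer_instance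
def pvWitness_analyze_histogram : List Int × Option (List Int) := ([1, 3, 2], some [5, 7, 4])
def Spec_analyze_histogram (hist : List Int) (weights : Option (List Int)) (out : Int × Int × Int × Int) : Prop := out = analyze_histogram_alt hist weights
instance (hist : List Int) (weights : Option (List Int)) (out : Int × Int × Int × Int) : Decidable (Spec_analyze_histogram hist weights out) := by unfold Spec_analyze_histogram; infer_instance

-- ===== CLAIM (what is proved, stated in full; the proofs are below) =====
def Claim_equal_analyze_histogram : Prop := ∀ (hist : List Int) (weights : Option (List Int)), Dom_analyze_histogram hist weights → Pre_analyze_histogram hist weights → Spec_analyze_histogram hist weights (analyze_histogram hist weights)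

-- ===== LEMMAS AND PROOFS =====

-- A's loop body, expressed on a (size, weight) pair.
def pvStep (acc : Int × Int × Int × Int) (p : Int × Int) : Int × Int × Int × Int :=
  let (nt, sg, st, ls) := acc
  if p.1 == 1 then (nt + 1, sg + p.2, st + p.2, ls)
  else if p.2 > ls then (nt + 1, sg, st + p.2, p.2)
  else (nt + 1, sg, st + p.2, ls)

-- Closed form of A's loop over a list of (size, weight) pairs.
theorem pvLoop_spec (ps : List (Int × Int)) (nt sg st ls : Int) :
    ps.foldl pvStep (nt, sg, st, ls)
      = (nt + ps.length,
         sg + ((ps.filter (fun p => p.1 == 1)).map (fun p => p.2)).sum,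
         st + (ps.map (fun p => p.2)).sum,
         ((ps.filter (fun p => p.1 != 1)).map (fun p => p.2)).foldl max ls) := by
  induction ps generalizing nt sg st ls with
  | nil => simp
  | cons p t ih =>
    by_cases h1 : p.1 = 1
    · simp [pvStep, h1, ih]
      omega
    · by_cases h2 : p.2 > ls
      · have hm : max ls p.2 = p.2 := by omega
        simp [pvStep, h1, h2, ih, hm]
        omega
      · have hm : max ls p.2 = ls := by omega
        simp [pvStep, h1, h2, ih, hm]
        omega

theorem pvZip_eq_map (xs ys : List Int) (h : xs.length ≤ ys.length) :
    xs.zip ys = (PySem.List.pyRange 0 xs.length 1).map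
      (fun n => (PySem.List.pyGetD xs n 0, PySem.List.pyGetD ys n 0)) := by
  apply List.ext_getElem
  · simp [PySem.List.length_pyRange_one]; omega
  · intro k hk1 hk2
    have hk : k < xs.length := by simp at hk1; omega
    simp only [List.getElem_map]
    rw [PySem.List.getElem_pyRange_one]
    simp [List.getElem_zip, hk, Nat.lt_of_lt_of_le hk h]

theorem pvPairs_closed (hist ws : List Int) (h : hist.length = ws.length) :
    (hist.zip ws).foldl pvStep (0, 0, 0, 0) =
      ((hist.length : Int),
       (((hist.zip ws).filter (fun p => p.1 == 1)).map (fun p => p.2)).sum,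
       ws.sum,
       (PySem.List.max? ((0 : Int) :: ((hist.zip ws).filter (fun p => p.1 != 1)).map (fun p => p.2)) (fun y => y)).getD 0) := by
  rw [pvLoop_spec]
  have hsnd : (hist.zip ws).map (fun p => p.2) = ws := by
    have := List.map_snd_zip (le_of_eq h.symm)
    simpa [Function.comp] using this
  simp [PySem.List.max?_id_cons, h, hsnd]

theorem pvA_pairs (hist ws : List Int) (h : hist.length = ws.length)
    (body : (Int × Int × Int × Int) → Int → (Int × Int × Int × Int))
    (hbody : ∀ (acc : Int × Int × Int × Int), ∀ n ∈ PySem.List.pyRange 0 (hist.length : Int) 1,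
      body acc n = pvStep acc (PySem.List.pyGetD hist n 0, PySem.List.pyGetD ws n 0)) :
    (PySem.List.pyRange 0 (hist.length : Int) 1).foldl body (0, 0, 0, 0)
      = (hist.zip ws).foldl pvStep (0, 0, 0, 0) := by
  rw [PySem.List.foldl_congr_mem _ _ _ _ hbody, pvZip_eq_map hist ws (le_of_eq h), List.foldl_map]

theorem pvMain (hist : List Int) (weights : Option (List Int))
    (hpre : Pre_analyze_histogram hist weights) :
    analyze_histogram hist weights = analyze_histogram_alt hist weights := by
  cases weights with
  | none =>
      have h1 : analyze_histogram hist none = (hist.zip hist).foldl pvStep (0, 0, 0, 0) := by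
        unfold analyze_histogram
        exact pvA_pairs hist hist rfl _ (fun acc n _ => rfl)
      rw [h1, pvPairs_closed hist hist rfl]
      rfl
  | some l =>
      by_cases hl : l.isEmpty
      · have h1 : analyze_histogram hist (some l) = (hist.zip hist).foldl pvStep (0, 0, 0, 0) := by
          unfold analyze_histogram
          exact pvA_pairs hist hist rfl _ (fun acc n _ => by simp [pvStep, hl])
        rw [h1, pvPairs_closed hist hist rfl]
        simp [analyze_histogram_alt, hl]
      · have hlen : hist.length ≤ l.length := by
          unfold Pre_analyze_histogram at hpre
          simp [hl] at hpre
          exact hpre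
        have hws : hist.length = (l.take hist.length).length := by
          simp [List.length_take]; omega
        have h1 : analyze_histogram hist (some l)
            = (hist.zip (l.take hist.length)).foldl pvStep (0, 0, 0, 0) := by
          unfold analyze_histogram
          refine pvA_pairs hist (l.take hist.length) hws _ (fun acc n hn => ?_)
          obtain ⟨hn0, hn1⟩ := PySem.List.mem_pyRange_one.mp hn
          have e : PySem.List.pyGetD l n 0 = PySem.List.pyGetD (l.take hist.length) n 0 := by
            rw [PySem.List.pyGetD_eq_getElem l 0 hn0 (by omega),
                PySem.List.pyGetD_eq_getElem (l.take hist.length) 0 hn0 (by simp [List.length_take]; omega)]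
            simp [List.getElem_take]
          simp [pvStep, hl, e]
        rw [h1, pvPairs_closed hist (l.take hist.length) hws]
        simp [analyze_histogram_alt, hl, PySem.List.slice_to_natCast]

-- ===== VERDICT (by name: the statement is the Claim_ definition above) =====
theorem analyze_histogram_spec : Claim_equal_analyze_histogram := by
  intro hist weights _ hpre
  exact pvMain hist weights hpre
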